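-- pv_equiv track=rewrite | github.com/linhdvu14/cp-sols | sols/Meta/HackerCup/2022/2022_0/B2_Second_Second_Friend.py | solve
-- ===== SOURCE A (Python) =====
-- def solve(R, C, grid):
--     bad = []
--     nei = [[-1] * C for _ in range(R)]
--     for r in range(R):
--         for c in range(C):
--             nei[r][c] = (r > 0) + (r < R-1) + (c > 0) + (c < C-1)
--             if grid[r][c] == '#' or nei[r][c] < 2:
--                 nei[r][c] = 0
--                 bad.append((r, c))
--
--     while bad:
--         r, c = bad.pop()
--         for nr, nc in [(r-1, c), (r+1, c), (r, c-1), (r, c+1)]: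
--             if not (0 <= nr < R and 0 <= nc < C): continue
--             if nei[nr][nc] == 0: continue
--             nei[nr][nc] -= 1
--             if nei[nr][nc] < 2:
--                 nei[nr][nc] = 0
--                 bad.append((nr, nc))
--
--     for r in range(R):
--         for c in range(C):
--             if grid[r][c] == '^' and nei[r][c] == 0: return 'Impossible', None
--             if nei[r][c] >= 2: grid[r][c] = '^'
--
--     return 'Possible', grid
-- ===== SOURCE B (Python) =====
-- def solve(R, C, grid):
--     # Fixed-point iteration on an alive-mask: repeat synchronous full passes
--     # killing every cell with fewer than 2 alive neighbours, until stable.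
--     alive = [[grid[r][c] != '#' for c in range(C)] for r in range(R)]
--     while True:
--         new = [[alive[r][c]
--                 and ((r > 0 and alive[r-1][c])
--                      + (r + 1 < R and alive[r+1][c])
--                      + (c > 0 and alive[r][c-1])
--                      + (c + 1 < C and alive[r][c+1]) >= 2)
--                 for c in range(C)] for r in range(R)]
--         if new == alive:
--             break
--         alive = new
--     for r in range(R):
--         for c in range(C):
--             if grid[r][c] == '^' and not alive[r][c]:
--                 return 'Impossible', None
--             if alive[r][c]:
--                 grid[r][c] = '^'
--     return 'Possible', grid
-- ===== Notes on version B (the rewrite author's own statement) =====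
-- stated objective: alternative
-- what changed: Replaces A's worklist elimination (a nei counter matrix plus a bad stack that decrements neighbours on each pop) by synchronous fixed-point iteration on a boolean alive mask: repeated full passes that recompute every cell's alive-neighbour count and kill cells with fewer than 2, until a pass changes nothing; the final row-major check/mutation loop is kept.
import Mathlib
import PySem

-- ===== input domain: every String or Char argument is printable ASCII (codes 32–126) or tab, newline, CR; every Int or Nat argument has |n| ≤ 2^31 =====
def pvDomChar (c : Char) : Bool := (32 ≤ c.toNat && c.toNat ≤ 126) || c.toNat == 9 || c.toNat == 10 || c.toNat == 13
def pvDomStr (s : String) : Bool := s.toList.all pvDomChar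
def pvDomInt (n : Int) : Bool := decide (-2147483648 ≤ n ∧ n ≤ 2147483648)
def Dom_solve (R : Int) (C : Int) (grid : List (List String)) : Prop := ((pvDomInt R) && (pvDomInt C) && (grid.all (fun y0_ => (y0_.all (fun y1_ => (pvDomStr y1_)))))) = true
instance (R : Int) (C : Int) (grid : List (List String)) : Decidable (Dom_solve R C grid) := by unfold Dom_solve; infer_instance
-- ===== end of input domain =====

-- B replaces A's worklist/counter elimination by synchronous fixed-point passes over a
-- boolean alive mask (objective: alternative, same return value).  NOTE: the Python A
-- mutates `grid` in place in its final loop (and B performs the same mutation); the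
-- equivalence proved here is about the RETURN value.

-- shared 2-d list access helpers (Python `xss[r][c]` read / write at in-range indices)
def get2 {α : Type} (xss : List (List α)) (d : α) (r c : Nat) : α := (xss.getD r []).getD c d
def set2 {α : Type} (xss : List (List α)) (r c : Nat) (v : α) : List (List α) :=
  xss.set r ((xss.getD r []).set c v)
-- the row-major list of cells `for r in range(R): for c in range(C)`
def cellsRC (n m : Nat) : List (Nat × Nat) :=
  (List.range n).flatMap (fun r => (List.range m).map (fun c => (r, c)))

-- ===== PORT A =====
-- nei[r][c] = (r > 0) + (r < R-1) + (c > 0) + (c < C-1)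
def degA (R C : Int) (r c : Nat) : Int :=
  (if 0 < r then 1 else 0) + (if (r : Int) < R - 1 then 1 else 0) +
  (if 0 < c then 1 else 0) + (if (c : Int) < C - 1 then 1 else 0)

-- body of A's init double loop (bad is kept reversed: Python append/pop at the end = push/pop at the head)
def initStep (R C : Int) (grid : List (List String))
    (s : List (List Int) × List (Nat × Nat)) (rc : Nat × Nat) :
    List (List Int) × List (Nat × Nat) :=
  let d := degA R C rc.1 rc.2
  if get2 grid "" rc.1 rc.2 = "#" ∨ d < 2 then (set2 s.1 rc.1 rc.2 0, rc :: s.2)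
  else (set2 s.1 rc.1 rc.2 d, s.2)

def initA (R C : Int) (grid : List (List String)) : List (List Int) × List (Nat × Nat) :=
  (cellsRC R.toNat C.toNat).foldl (initStep R C grid)
    ((List.range R.toNat).map (fun _ => List.replicate C.toNat (-1)), [])

-- the four neighbour candidates [(r-1,c),(r+1,c),(r,c-1),(r,c+1)] with Python's
-- in-bounds check 0 <= nr < R and 0 <= nc < C (indices are Nats, guards written on Int)
def nbrsA (R C : Int) (r c : Nat) : List (Nat × Nat) :=
  (if 0 < r ∧ (r : Int) - 1 < R then [(r - 1, c)] else []) ++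
  (if (r : Int) + 1 < R then [(r + 1, c)] else []) ++
  (if 0 < c ∧ (c : Int) - 1 < C then [(r, c - 1)] else []) ++
  (if (c : Int) + 1 < C then [(r, c + 1)] else [])

-- body of A's per-neighbour update
def stepA (s : List (List Int) × List (Nat × Nat)) (nb : Nat × Nat) :
    List (List Int) × List (Nat × Nat) :=
  let v := get2 s.1 0 nb.1 nb.2
  if v = 0 then s
  else if v - 1 < 2 then (set2 s.1 nb.1 nb.2 0, nb :: s.2)
  else (set2 s.1 nb.1 nb.2 (v - 1), s.2)

-- A's `while bad:` loop; fuel is only a termination bound for the port (the measure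
-- |bad| + 2*Σ nei strictly decreases each iteration, see `sumNei` below)
def loopA (R C : Int) : Nat → List (List Int) → List (Nat × Nat) → List (List Int)
  | 0, N, _ => N
  | _ + 1, N, [] => N
  | f + 1, N, x :: bad =>
      let s := (nbrsA R C x.1 x.2).foldl stepA (N, bad)
      loopA R C f s.1 s.2

def sumNei (N : List (List Int)) : Nat :=
  N.foldl (fun acc row => acc + row.foldl (fun a v => a + v.toNat) 0) 0

-- A's final double loop (early return on an isolated '^', otherwise grow '^' in place)
def finA (N : List (List Int)) : List (Nat × Nat) → List (List String) →
    String × Option (List (List String))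
  | [], g => ("Possible", some g)
  | x :: rest, g =>
      if get2 g "" x.1 x.2 = "^" ∧ get2 N 0 x.1 x.2 = 0 then ("Impossible", none)
      else finA N rest (if 2 ≤ get2 N 0 x.1 x.2 then set2 g x.1 x.2 "^" else g)

def solve (R : Int) (C : Int) (grid : List (List String)) : String × Option (List (List String)) :=
  let ib := initA R C grid
  finA (loopA R C (ib.2.length + 2 * sumNei ib.1 + 1) ib.1 ib.2)
    (cellsRC R.toNat C.toNat) grid

-- ===== PORT B =====
-- count of currently-alive in-bounds neighbours of (r,c)
def cntB (R C : Int) (S : List (List Bool)) (r c : Nat) : Nat :=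
  (if 0 < r ∧ get2 S false (r - 1) c then 1 else 0) +
  (if (r : Int) + 1 < R ∧ get2 S false (r + 1) c then 1 else 0) +
  (if 0 < c ∧ get2 S false r (c - 1) then 1 else 0) +
  (if (c : Int) + 1 < C ∧ get2 S false r (c + 1) then 1 else 0)

-- one synchronous pass: keep a cell iff it is alive and has >= 2 alive neighbours
def passB (R C : Int) (S : List (List Bool)) : List (List Bool) :=
  (List.range R.toNat).map fun r => (List.range C.toNat).map fun c =>
    get2 S false r c && decide (2 ≤ cntB R C S r c)

-- B's `while True:` loop; fuel is only a termination bound (every non-final pass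
-- kills at least one alive cell, see `cntTrue` below)
def loopB (R C : Int) : Nat → List (List Bool) → List (List Bool)
  | 0, S => S
  | f + 1, S => let S' := passB R C S; if S' = S then S else loopB R C f S'

def cntTrue (S : List (List Bool)) : Nat :=
  S.foldl (fun acc row => acc + row.countP (fun b => b)) 0

-- B's final double loop (same shape as A's, reading the alive mask)
def finB (S : List (List Bool)) : List (Nat × Nat) → List (List String) →
    String × Option (List (List String))
  | [], g => ("Possible", some g)
  | x :: rest, g =>
      if get2 g "" x.1 x.2 = "^" ∧ get2 S false x.1 x.2 = false then ("Impossible", none)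
      else finB S rest (if get2 S false x.1 x.2 then set2 g x.1 x.2 "^" else g)

def solve_alt (R : Int) (C : Int) (grid : List (List String)) : String × Option (List (List String)) :=
  let alive0 : List (List Bool) :=
    (List.range R.toNat).map fun r => (List.range C.toNat).map fun c =>
      decide (get2 grid "" r c ≠ "#")
  finB (loopB R C (cntTrue alive0 + 1) alive0) (cellsRC R.toNat C.toNat) grid

-- ===== PRECONDITION & SPEC =====
-- Pre_solve excludes exactly the inputs where the Python A raises IndexError:
-- 0 < R and 0 < C but the grid has fewer than R rows or some of the first R rows
-- has fewer than C entries (B raises there too).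
def Pre_solve (R : Int) (C : Int) (grid : List (List String)) : Prop :=
  0 < R → 0 < C → R ≤ (grid.length : Int) ∧ ∀ row ∈ grid.take R.toNat, C ≤ (row.length : Int)
instance (R : Int) (C : Int) (grid : List (List String)) : Decidable (Pre_solve R C grid) := by
  unfold Pre_solve; infer_instance
def pvWitness_solve : Int × Int × List (List String) :=
  (3, 3, [["^", ".", "."], [".", ".", "#"], [".", ".", "."]])
def Spec_solve (R : Int) (C : Int) (grid : List (List String)) (out : String × Option (List (List String))) : Prop := out = solve_alt R C grid
instance (R : Int) (C : Int) (grid : List (List String)) (out : String × Option (List (List String))) : Decidable (Spec_solve R C grid out) := by unfold Spec_solve; infer_instance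

-- ===== CLAIM (what is proved, stated in full; the proofs are below) =====
def Claim_equal_solve : Prop := ∀ (R : Int) (C : Int) (grid : List (List String)), Dom_solve R C grid → Pre_solve R C grid → Spec_solve R C grid (solve R C grid)

-- ===== LEMMAS AND PROOFS =====

-- ---- basic 2-d access lemmas ----
def shapeM {α : Type} (n m : Nat) (M : List (List α)) : Prop :=
  M.length = n ∧ ∀ r, r < n → (M.getD r []).length = m

theorem get2_oob {α : Type} {n m : Nat} {M : List (List α)} (h : shapeM n m M)
    (d : α) {r c : Nat} (hrc : n ≤ r ∨ m ≤ c) : get2 M d r c = d := by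
  obtain ⟨h1, h2⟩ := h
  rcases hrc with hr | hc
  · have : M[r]? = none := by rw [List.getElem?_eq_none_iff]; omega
    simp [get2, List.getD_eq_getElem?_getD, this]
  · unfold get2
    by_cases hr : r < n
    · have := h2 r hr
      rw [List.getD_eq_getElem?_getD (l := M.getD r []), List.getElem?_eq_none_iff.mpr (by omega)]
      rfl
    · have : M[r]? = none := by rw [List.getElem?_eq_none_iff]; omega
      simp [List.getD_eq_getElem?_getD, this]

theorem shapeM_set2 {α : Type} {n m : Nat} {M : List (List α)} (h : shapeM n m M)
    (r c : Nat) (v : α) : shapeM n m (set2 M r c v) := by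
  obtain ⟨h1, h2⟩ := h
  refine ⟨by simp [set2, h1], ?_⟩
  intro r' hr'
  by_cases he : r = r'
  · subst he
    by_cases hlt : r < M.length
    · rw [set2, List.getD_eq_getElem?_getD, List.getElem?_set_self (by simpa using hlt)]
      simpa using h2 r hr'
    · rw [set2, List.set_eq_of_length_le (by omega)]
      exact h2 r hr'
  · rw [set2, List.getD_eq_getElem?_getD, List.getElem?_set_ne he, ← List.getD_eq_getElem?_getD]
    exact h2 r' hr'

theorem get2_set2_self {α : Type} {n m : Nat} {M : List (List α)} (h : shapeM n m M)
    (d : α) {r c : Nat} (hr : r < n) (hc : c < m) (v : α) :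
    get2 (set2 M r c v) d r c = v := by
  obtain ⟨h1, h2⟩ := h
  have hrl : r < M.length := by omega
  have hcl : c < (M.getD r []).length := by rw [h2 r hr]; exact hc
  have hrow : (M.set r ((M.getD r []).set c v)).getD r [] = (M.getD r []).set c v := by
    rw [List.getD_eq_getElem?_getD, List.getElem?_set_self (by simpa using hrl)]; rfl
  rw [get2, set2, hrow, List.getD_eq_getElem?_getD, List.getElem?_set_self (by simpa using hcl)]
  rfl

theorem get2_set2_ne {α : Type} {M : List (List α)} (d : α) {r c r' c' : Nat}
    (hne : (r, c) ≠ (r', c')) (v : α) :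
    get2 (set2 M r c v) d r' c' = get2 M d r' c' := by
  by_cases he : r = r'
  · subst he
    have hc : c ≠ c' := by intro h; exact hne (by simp [h])
    unfold get2 set2
    by_cases hlt : r < M.length
    · have hrow : (M.set r ((M.getD r []).set c v)).getD r [] = (M.getD r []).set c v := by
        rw [List.getD_eq_getElem?_getD, List.getElem?_set_self (by simpa using hlt)]; rfl
      rw [hrow]
      simp [List.getD_eq_getElem?_getD, List.getElem?_set_ne hc]
    · rw [List.set_eq_of_length_le (by omega)]
  · unfold get2 set2
    have hrow : (M.set r ((M.getD r []).set c v)).getD r' [] = M.getD r' [] := by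
      rw [List.getD_eq_getElem?_getD, List.getElem?_set_ne he, ← List.getD_eq_getElem?_getD]
    rw [hrow]

theorem get2_map_range {α : Type} (n m : Nat) (f : Nat → Nat → α) (d : α)
    {r c : Nat} (hr : r < n) (hc : c < m) :
    get2 ((List.range n).map (fun r => (List.range m).map (f r))) d r c = f r c := by
  simp [get2, List.getD_eq_getElem?_getD, hr, hc]

theorem shapeM_map_range {α : Type} (n m : Nat) (f : Nat → Nat → α) :
    shapeM n m ((List.range n).map (fun r => (List.range m).map (f r))) := by
  refine ⟨by simp, ?_⟩
  intro r hr
  simp [List.getD_eq_getElem?_getD, hr]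

-- ---- cells ----
theorem mem_cellsRC {n m : Nat} {y : Nat × Nat} : y ∈ cellsRC n m ↔ y.1 < n ∧ y.2 < m := by
  obtain ⟨a, b⟩ := y
  simp [cellsRC, List.mem_flatMap]
theorem nodup_cellsRC (n m : Nat) : (cellsRC n m).Nodup := by
  rw [cellsRC, List.nodup_flatMap]
  constructor
  · intro r _
    exact (List.nodup_range).map (fun a b h => by simpa using h)
  · refine List.Pairwise.imp ?_ (List.pairwise_lt_range)
    intro a b hab
    simp only [Function.onFun, List.disjoint_left]
    intro y hy hy'
    simp only [List.mem_map, List.mem_range] at hy hy'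
    obtain ⟨c, _, rfl⟩ := hy
    obtain ⟨c', _, h⟩ := hy'
    cases h
    omega

-- ---- canonical neighbour list ----
def nbr (n m : Nat) (r c : Nat) : List (Nat × Nat) :=
  (if 0 < r then [(r - 1, c)] else []) ++ (if r + 1 < n then [(r + 1, c)] else []) ++
  (if 0 < c then [(r, c - 1)] else []) ++ (if c + 1 < m then [(r, c + 1)] else [])

theorem mem_nbr {n m r c a b : Nat} :
    (a, b) ∈ nbr n m r c ↔
      (0 < r ∧ a = r - 1 ∧ b = c) ∨ (r + 1 < n ∧ a = r + 1 ∧ b = c) ∨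
      (0 < c ∧ a = r ∧ b = c - 1) ∨ (c + 1 < m ∧ a = r ∧ b = c + 1) := by
  unfold nbr
  by_cases h1 : 0 < r <;> by_cases h2 : r + 1 < n <;> by_cases h3 : 0 < c <;>
    by_cases h4 : c + 1 < m <;>
    simp [h1, h2, h3, h4, Prod.ext_iff]

theorem nbr_bounds {n m r c : Nat} (hr : r < n) (hc : c < m) {y : Nat × Nat}
    (hy : y ∈ nbr n m r c) : y.1 < n ∧ y.2 < m := by
  obtain ⟨a, b⟩ := y
  rcases mem_nbr.mp hy with ⟨h, rfl, rfl⟩ | ⟨h, rfl, rfl⟩ | ⟨h, rfl, rfl⟩ | ⟨h, rfl, rfl⟩ <;>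
    constructor <;> simp <;> omega

theorem nbr_nodup (n m r c : Nat) : (nbr n m r c).Nodup := by
  unfold nbr
  by_cases h1 : 0 < r <;> by_cases h2 : r + 1 < n <;> by_cases h3 : 0 < c <;>
    by_cases h4 : c + 1 < m <;>
    simp [h1, h2, h3, h4, List.nodup_cons, Prod.ext_iff] <;> omega

theorem nbr_symm {n m r c a b : Nat} (hr : r < n) (hc : c < m) (ha : a < n) (hb : b < m) :
    ((a, b) ∈ nbr n m r c) ↔ ((r, c) ∈ nbr n m a b) := by
  rw [mem_nbr, mem_nbr]
  omega

theorem nbrsA_eq {R C : Int} {r c : Nat} (hr : r < R.toNat) (hc : c < C.toNat) :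
    nbrsA R C r c = nbr R.toNat C.toNat r c := by
  have e1 : (0 < r ∧ (r : Int) - 1 < R) ↔ (0 < r) := by
    constructor
    · exact fun h => h.1
    · intro h; exact ⟨h, by omega⟩
  have e2 : ((r : Int) + 1 < R) ↔ (r + 1 < R.toNat) := by omega
  have e3 : (0 < c ∧ (c : Int) - 1 < C) ↔ (0 < c) := by
    constructor
    · exact fun h => h.1
    · intro h; exact ⟨h, by omega⟩
  have e4 : ((c : Int) + 1 < C) ↔ (c + 1 < C.toNat) := by omega
  simp only [nbrsA, nbr, e1, e2, e3, e4]

theorem degA_eq {R C : Int} {r c : Nat} (hr : r < R.toNat) (hc : c < C.toNat) :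
    degA R C r c = ((nbr R.toNat C.toNat r c).length : Int) := by
  have e2 : ((r : Int) < R - 1) ↔ (r + 1 < R.toNat) := by omega
  have e4 : ((c : Int) < C - 1) ↔ (c + 1 < C.toNat) := by omega
  simp only [degA, nbr, e2, e4]
  by_cases h1 : 0 < r <;> by_cases h2 : r + 1 < R.toNat <;> by_cases h3 : 0 < c <;>
    by_cases h4 : c + 1 < C.toNat <;> simp [h1, h2, h3, h4]

-- ---- neighbour counting ----
def cnt (p : Nat → Nat → Bool) (l : List (Nat × Nat)) : Nat := l.countP (fun y => p y.1 y.2)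
def memb (P : List (Nat × Nat)) : Nat → Nat → Bool := fun r c => decide ((r, c) ∈ P)

theorem cnt_congr {p q : Nat → Nat → Bool} {l : List (Nat × Nat)}
    (h : ∀ y ∈ l, p y.1 y.2 = q y.1 y.2) : cnt p l = cnt q l := by
  exact List.countP_congr (fun y hy => by rw [h y hy])

theorem cnt_nil (l : List (Nat × Nat)) : cnt (memb []) l = 0 := by
  simp [cnt, memb]

theorem cnt_le_length (p : Nat → Nat → Bool) (l : List (Nat × Nat)) : cnt p l ≤ l.length := by
  exact List.countP_le_length

theorem cnt_snoc {P : List (Nat × Nat)} {x : Nat × Nat} (hx : x ∉ P)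
    {l : List (Nat × Nat)} (hl : l.Nodup) :
    cnt (memb (P ++ [x])) l = cnt (memb P) l + (if x ∈ l then 1 else 0) := by
  induction l with
  | nil => simp [cnt]
  | cons y l' ih =>
      rw [List.nodup_cons] at hl
      have ihl := ih hl.2
      by_cases hyx : y = x
      · subst hyx
        have h1 : memb (P ++ [y]) y.1 y.2 = true := by simp [memb]
        have h2 : memb P y.1 y.2 = false := by
          simp only [memb, decide_eq_false_iff_not]; simpa using hx
        simp only [cnt, List.countP_cons] at *
        simp [h1, h2, ihl, hl.1]
      · have h1 : memb (P ++ [x]) y.1 y.2 = memb P y.1 y.2 := by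
          simp only [memb]
          congr 1
          apply propext
          simp only [List.mem_append, List.mem_singleton]
          constructor
          · rintro (h | h)
            · exact h
            · exact absurd (by simpa using h) hyx
          · exact Or.inl
        have hmem : (x ∈ y :: l') ↔ (x ∈ l') := by
          simp [List.mem_cons, (Ne.symm hyx)]
        simp only [cnt, List.countP_cons] at *
        rw [h1, ihl]
        simp only [hmem]
        omega

theorem cnt_disjoint {p q : Nat → Nat → Bool} (h : ∀ a b, p a b = true → q a b = false)
    (l : List (Nat × Nat)) : cnt p l + cnt q l ≤ l.length := by
  induction l with
  | nil => simp [cnt]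
  | cons y l' ih =>
      simp only [cnt, List.countP_cons, List.length_cons] at *
      by_cases hp : p y.1 y.2 = true
      · have := h _ _ hp
        simp [hp, this]; omega
      · simp only [Bool.not_eq_true] at hp
        simp [hp]; split <;> omega

theorem cnt_compl (p : Nat → Nat → Bool) (l : List (Nat × Nat)) :
    cnt p l + cnt (fun a b => !p a b) l = l.length := by
  induction l with
  | nil => simp [cnt]
  | cons y l' ih =>
      simp only [cnt, List.countP_cons, List.length_cons] at *
      cases hp : p y.1 y.2 <;> simp <;> omega

theorem cnt_mono {p q : Nat → Nat → Bool} {l : List (Nat × Nat)}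
    (h : ∀ y ∈ l, p y.1 y.2 = true → q y.1 y.2 = true) : cnt p l ≤ cnt q l := by
  unfold cnt
  exact List.countP_mono_left (fun y hy => by
    intro hp
    exact h y hy hp)

-- ---- measure ----
theorem sumNei_eq (N : List (List Int)) :
    sumNei N = (N.map (fun row => (row.map Int.toNat).sum)).sum := by
  unfold sumNei
  rw [PySem.List.foldl_add_nat]
  simp only [Nat.zero_add]
  congr 1
  apply List.map_congr_left
  intro row _
  rw [PySem.List.foldl_add_nat]
  simp

theorem cntTrue_eq (S : List (List Bool)) :
    cntTrue S = (S.map (fun row => row.countP (fun b => b))).sum := by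
  unfold cntTrue
  rw [PySem.List.foldl_add_nat]
  simp

theorem sum_set_nat (l : List Nat) (i : Nat) (v : Nat) (h : i < l.length) :
    (l.set i v).sum + l.getD i 0 = l.sum + v := by
  induction l generalizing i with
  | nil => simp at h
  | cons a l ih =>
      cases i with
      | zero => simp; omega
      | succ i =>
          simp only [List.set_cons_succ, List.sum_cons, List.getD_cons_succ]
          have := ih i (by simpa using h)
          omega

theorem sum_toNat_set (l : List Int) (i : Nat) (v : Int) (h : i < l.length) :
    ((l.set i v).map Int.toNat).sum + (l.getD i 0).toNat = (l.map Int.toNat).sum + v.toNat := by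
  induction l generalizing i with
  | nil => simp at h
  | cons a l ih =>
      cases i with
      | zero => simp [List.getD_eq_getElem?_getD]; omega
      | succ i =>
          simp only [List.set_cons_succ, List.map_cons, List.sum_cons, List.getD_cons_succ]
          have := ih i (by simpa using h)
          omega

theorem sumNei_set2 {n m : Nat} {N : List (List Int)} (h : shapeM n m N)
    {r c : Nat} (hr : r < n) (hc : c < m) (v : Int) :
    sumNei (set2 N r c v) + (get2 N 0 r c).toNat = sumNei N + v.toNat := by
  obtain ⟨h1, h2⟩ := h
  have hrl : r < N.length := by omega
  have hrow : (N.getD r []).length = m := h2 r hr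
  rw [sumNei_eq, sumNei_eq]
  unfold set2 get2
  rw [List.map_set]
  have hstep := sum_toNat_set (N.getD r []) c v (by omega)
  have houter := sum_set_nat (N.map (fun row => (row.map Int.toNat).sum)) r
      (((N.getD r []).set c v).map Int.toNat).sum (by simpa using hrl)
  have hgetD : (N.map (fun row => (row.map Int.toNat).sum)).getD r 0 = ((N.getD r []).map Int.toNat).sum := by
    rw [List.getD_eq_getElem?_getD, List.getElem?_map, List.getD_eq_getElem?_getD,
      List.getElem?_eq_getElem hrl]
    simp
  rw [hgetD] at houter
  omega

-- ---- stability ----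
def StableP (n m : Nat) (grid : List (List String)) (p : Nat → Nat → Bool) : Prop :=
  ∀ r c, p r c = true → r < n ∧ c < m ∧ get2 grid "" r c ≠ "#" ∧ 2 ≤ cnt p (nbr n m r c)

-- ---- A-side invariant ----
def InvM (n m : Nat) (grid : List (List String)) (T : Nat → Nat → Bool)
    (N : List (List Int)) (bad P L : List (Nat × Nat)) : Prop :=
  shapeM n m N ∧
  (∀ x ∈ P ++ bad, x.1 < n ∧ x.2 < m ∧ T x.1 x.2 = false) ∧
  (P ++ bad).Nodup ∧
  (∀ r, r < n → ∀ c, c < m → (get2 N 0 r c = 0 ↔ (r, c) ∈ P ++ bad)) ∧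
  (∀ r, r < n → ∀ c, c < m → get2 N 0 r c ≠ 0 →
     get2 grid "" r c ≠ "#" ∧ 2 ≤ get2 N 0 r c ∧
     get2 N 0 r c = ((nbr n m r c).length : Int) - (cnt (memb P) (nbr n m r c) : Int)
       + (if (r, c) ∈ L then 1 else 0))

theorem stepA_preserve {n m : Nat} {grid : List (List String)} {T : Nat → Nat → Bool}
    (hT : StableP n m grid T) {N : List (List Int)} {bad P : List (Nat × Nat)}
    {nb : Nat × Nat} {L' : List (Nat × Nat)} (hb1 : nb.1 < n) (hb2 : nb.2 < m)
    (hnbL : nb ∉ L') (hI : InvM n m grid T N bad P (nb :: L')) :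
    InvM n m grid T (stepA (N, bad) nb).1 (stepA (N, bad) nb).2 P L' ∧
    (stepA (N, bad) nb).2.length + 2 * sumNei (stepA (N, bad) nb).1 ≤ bad.length + 2 * sumNei N := by
  obtain ⟨nr, nc⟩ := nb
  simp only at hb1 hb2 hnbL
  obtain ⟨hsh, hPB, hnd, hzero, halive⟩ := hI
  by_cases hv : get2 N 0 nr nc = 0
  · -- dead neighbour: skip
    have hres : stepA (N, bad) (nr, nc) = (N, bad) := by simp [stepA, hv]
    rw [hres]
    refine ⟨⟨hsh, hPB, hnd, hzero, ?_⟩, le_refl _⟩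
    intro r hr c hc hne0
    obtain ⟨g1, g2, g3⟩ := halive r hr c hc hne0
    refine ⟨g1, g2, ?_⟩
    rw [g3]
    by_cases he : r = nr ∧ c = nc
    · obtain ⟨rfl, rfl⟩ := he
      exact absurd hv hne0
    · have hmc : ((r, c) ∈ (nr, nc) :: L') ↔ ((r, c) ∈ L') := by
        simp only [List.mem_cons, Prod.mk.injEq]
        constructor
        · rintro (h | h)
          · exact absurd h he
          · exact h
        · exact Or.inr
      simp only [hmc]
  · have hmem : ((nr, nc) : Nat × Nat) ∈ ((nr, nc) :: L') := List.mem_cons_self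
    obtain ⟨hash, h2v, heq⟩ := halive nr hb1 nc hb2 hv
    rw [if_pos hmem] at heq
    have hnotin : ((nr, nc) : Nat × Nat) ∉ P ++ bad := fun h => hv ((hzero nr hb1 nc hb2).mpr h)
    by_cases hv2 : get2 N 0 nr nc - 1 < 2
    · -- neighbour dies: zero it and push it on bad
      have hres : stepA (N, bad) (nr, nc) = (set2 N nr nc 0, (nr, nc) :: bad) := by
        simp [stepA, hv, hv2]
      rw [hres]
      have hTnb : T nr nc = false := by
        by_contra hT'
        have hTt : T nr nc = true := by revert hT'; cases T nr nc <;> simp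
        obtain ⟨_, _, _, hcnt⟩ := hT nr nc hTt
        have hdisj : cnt (memb P) (nbr n m nr nc) + cnt T (nbr n m nr nc) ≤
            (nbr n m nr nc).length := by
          apply cnt_disjoint
          intro a b hab
          have hmm : (a, b) ∈ P ++ bad := by
            simp only [memb, decide_eq_true_eq] at hab
            exact List.mem_append_left _ hab
          exact (hPB _ hmm).2.2
        omega
      have hshape' := shapeM_set2 hsh nr nc (0 : Int)
      refine ⟨⟨hshape', ?_, ?_, ?_, ?_⟩, ?_⟩
      · intro x hx
        rcases List.mem_append.mp hx with hx | hx
        · exact hPB _ (List.mem_append_left _ hx)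
        · rcases List.mem_cons.mp hx with rfl | hx
          · exact ⟨hb1, hb2, hTnb⟩
          · exact hPB _ (List.mem_append_right _ hx)
      · exact ((List.nodup_cons.mpr ⟨hnotin, hnd⟩).perm List.perm_middle.symm)
      · intro r hr c hc
        by_cases he : r = nr ∧ c = nc
        · obtain ⟨rfl, rfl⟩ := he
          rw [get2_set2_self hsh 0 hb1 hb2]
          simp only [true_iff]
          exact List.mem_append_right _ List.mem_cons_self
        · have hne : (r, c) ≠ ((nr, nc) : Nat × Nat) := by
            simp only [Ne, Prod.mk.injEq]; exact he
          rw [get2_set2_ne 0 (fun h => hne h.symm) _, hzero r hr c hc]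
          constructor
          · intro h
            rcases List.mem_append.mp h with h | h
            · exact List.mem_append_left _ h
            · exact List.mem_append_right _ (List.mem_cons_of_mem _ h)
          · intro h
            rcases List.mem_append.mp h with h | h
            · exact List.mem_append_left _ h
            · rcases List.mem_cons.mp h with h | h
              · exact absurd h hne
              · exact List.mem_append_right _ h
      · intro r hr c hc hne0
        by_cases he : r = nr ∧ c = nc
        · obtain ⟨rfl, rfl⟩ := he
          rw [get2_set2_self hsh 0 hb1 hb2] at hne0
          exact absurd rfl hne0
        · have hne : (r, c) ≠ ((nr, nc) : Nat × Nat) := by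
            simp only [Ne, Prod.mk.injEq]; exact he
          rw [get2_set2_ne 0 (fun h => hne h.symm) _] at hne0 ⊢
          obtain ⟨g1, g2, g3⟩ := halive r hr c hc hne0
          refine ⟨g1, g2, ?_⟩
          rw [g3]
          have hmc : ((r, c) ∈ (nr, nc) :: L') ↔ ((r, c) ∈ L') := by
            simp only [List.mem_cons]
            exact ⟨fun h => h.resolve_left hne, Or.inr⟩
          simp only [hmc]
      · have hsum := sumNei_set2 hsh hb1 hb2 (0 : Int)
        simp only [List.length_cons, Int.toNat_zero] at *
        omega
    · -- neighbour survives with one fewer alive neighbour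
      have hres : stepA (N, bad) (nr, nc) = (set2 N nr nc (get2 N 0 nr nc - 1), bad) := by
        simp [stepA, hv, hv2]
      rw [hres]
      have hshape' := shapeM_set2 hsh nr nc (get2 N 0 nr nc - 1)
      refine ⟨⟨hshape', hPB, hnd, ?_, ?_⟩, ?_⟩
      · intro r hr c hc
        by_cases he : r = nr ∧ c = nc
        · obtain ⟨rfl, rfl⟩ := he
          rw [get2_set2_self hsh 0 hb1 hb2]
          constructor
          · intro h; omega
          · intro h; exact absurd h hnotin
        · have hne : (r, c) ≠ ((nr, nc) : Nat × Nat) := by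
            simp only [Ne, Prod.mk.injEq]; exact he
          rw [get2_set2_ne 0 (fun h => hne h.symm) _]
          exact hzero r hr c hc
      · intro r hr c hc hne0
        by_cases he : r = nr ∧ c = nc
        · obtain ⟨rfl, rfl⟩ := he
          rw [get2_set2_self hsh 0 hb1 hb2] at hne0 ⊢
          refine ⟨hash, by omega, ?_⟩
          rw [if_neg hnbL]
          omega
        · have hne : (r, c) ≠ ((nr, nc) : Nat × Nat) := by
            simp only [Ne, Prod.mk.injEq]; exact he
          rw [get2_set2_ne 0 (fun h => hne h.symm) _] at hne0 ⊢
          obtain ⟨g1, g2, g3⟩ := halive r hr c hc hne0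
          refine ⟨g1, g2, ?_⟩
          rw [g3]
          have hmc : ((r, c) ∈ (nr, nc) :: L') ↔ ((r, c) ∈ L') := by
            simp only [List.mem_cons]
            exact ⟨fun h => h.resolve_left hne, Or.inr⟩
          simp only [hmc]
      · have hsum := sumNei_set2 hsh hb1 hb2 (get2 N 0 nr nc - 1)
        dsimp only
        omega

theorem foldA_inv {n m : Nat} {grid : List (List String)} {T : Nat → Nat → Bool}
    (hT : StableP n m grid T) :
    ∀ (L : List (Nat × Nat)) (N : List (List Int)) (bad P : List (Nat × Nat)),
      L.Nodup → (∀ y ∈ L, y.1 < n ∧ y.2 < m) → InvM n m grid T N bad P L →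
      InvM n m grid T (L.foldl stepA (N, bad)).1 (L.foldl stepA (N, bad)).2 P [] ∧
      (L.foldl stepA (N, bad)).2.length + 2 * sumNei (L.foldl stepA (N, bad)).1 ≤
        bad.length + 2 * sumNei N := by
  intro L
  induction L with
  | nil =>
      intro N bad P _ _ hI
      exact ⟨hI, le_refl _⟩
  | cons nb L' ih =>
      intro N bad P hnd hbd hI
      rw [List.nodup_cons] at hnd
      obtain ⟨hstep, hle⟩ := stepA_preserve hT (hbd nb List.mem_cons_self).1
        (hbd nb List.mem_cons_self).2 hnd.1 hI
      have hfold : (nb :: L').foldl stepA (N, bad) =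
          L'.foldl stepA ((stepA (N, bad) nb).1, (stepA (N, bad) nb).2) := by
        rw [List.foldl_cons]
      rw [hfold]
      obtain ⟨hI', hle'⟩ := ih (stepA (N, bad) nb).1 (stepA (N, bad) nb).2 P hnd.2
        (fun y hy => hbd y (List.mem_cons_of_mem _ hy)) hstep
      exact ⟨hI', le_trans hle' hle⟩

theorem pop_establish {n m : Nat} {grid : List (List String)} {T : Nat → Nat → Bool}
    {N : List (List Int)} {x : Nat × Nat} {bad P : List (Nat × Nat)}
    (hI : InvM n m grid T N (x :: bad) P []) :
    x.1 < n ∧ x.2 < m ∧ InvM n m grid T N bad (P ++ [x]) (nbr n m x.1 x.2) := by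
  obtain ⟨hsh, hPB, hnd, hzero, halive⟩ := hI
  have hx := hPB x (List.mem_append_right _ List.mem_cons_self)
  refine ⟨hx.1, hx.2.1, ?_⟩
  have hxnotP : x ∉ P := by
    have h2 : (x :: (P ++ bad)).Nodup := hnd.perm List.perm_middle
    exact fun h => (List.nodup_cons.mp h2).1 (List.mem_append_left _ h)
  have he : (P ++ [x]) ++ bad = P ++ x :: bad := by simp
  refine ⟨hsh, ?_, ?_, ?_, ?_⟩
  · rw [he]; exact hPB
  · rw [he]; exact hnd
  · intro r hr c hc
    rw [he]; exact hzero r hr c hc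
  · intro r hr c hc hne0
    obtain ⟨g1, g2, g3⟩ := halive r hr c hc hne0
    refine ⟨g1, g2, ?_⟩
    rw [if_neg (List.not_mem_nil), add_zero] at g3
    have hsnoc := cnt_snoc hxnotP (nbr_nodup n m r c)
    obtain ⟨x1, x2⟩ := x
    have hsymm : ((x1, x2) ∈ nbr n m r c) ↔ ((r, c) ∈ nbr n m x1 x2) :=
      nbr_symm hr hc hx.1 hx.2.1
    rw [g3, hsnoc]
    by_cases hin : (r, c) ∈ nbr n m x1 x2
    · rw [if_pos hin, if_pos (hsymm.mpr hin)]
      push_cast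
      ring
    · rw [if_neg hin, if_neg (fun h => hin (hsymm.mp h))]
      push_cast
      ring

theorem loopA_run {R C : Int} {grid : List (List String)} {T : Nat → Nat → Bool}
    (hT : StableP R.toNat C.toNat grid T) :
    ∀ (f : Nat) (N : List (List Int)) (bad P : List (Nat × Nat)),
      InvM R.toNat C.toNat grid T N bad P [] → bad.length + 2 * sumNei N ≤ f →
      ∃ P', InvM R.toNat C.toNat grid T (loopA R C f N bad) [] P' [] := by
  intro f
  induction f with
  | zero =>
      intro N bad P hI hle
      have hb : bad = [] := List.length_eq_zero_iff.mp (by omega)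
      subst hb
      exact ⟨P, hI⟩
  | succ f ih =>
      intro N bad P hI hle
      cases bad with
      | nil => exact ⟨P, hI⟩
      | cons x bad' =>
          obtain ⟨hx1, hx2, hI'⟩ := pop_establish hI
          have hnb : nbrsA R C x.1 x.2 = nbr R.toNat C.toNat x.1 x.2 := nbrsA_eq hx1 hx2
          have hfold := foldA_inv hT (nbr R.toNat C.toNat x.1 x.2) N bad' (P ++ [x])
            (nbr_nodup _ _ _ _) (fun y hy => nbr_bounds hx1 hx2 hy) hI'
          have hrun : loopA R C (f + 1) N (x :: bad') =
              loopA R C f ((nbrsA R C x.1 x.2).foldl stepA (N, bad')).1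
                ((nbrsA R C x.1 x.2).foldl stepA (N, bad')).2 := rfl
          rw [hrun, hnb]
          apply ih _ _ (P ++ [x]) hfold.1
          have := hfold.2
          simp only [List.length_cons] at hle
          omega

-- ---- A-side init ----
def InvI (R C : Int) (grid : List (List String)) (T : Nat → Nat → Bool)
    (done : List (Nat × Nat)) (N : List (List Int)) (bad : List (Nat × Nat)) : Prop :=
  shapeM R.toNat C.toNat N ∧
  (∀ x ∈ bad, x ∈ done) ∧ bad.Nodup ∧
  (∀ x ∈ bad, x.1 < R.toNat ∧ x.2 < C.toNat ∧ T x.1 x.2 = false) ∧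
  (∀ r, r < R.toNat → ∀ c, c < C.toNat →
     ((r, c) ∈ done →
        (get2 N 0 r c = 0 ∧ (r, c) ∈ bad) ∨
        (get2 N 0 r c = ((nbr R.toNat C.toNat r c).length : Int) ∧ 2 ≤ get2 N 0 r c ∧
         get2 grid "" r c ≠ "#" ∧ (r, c) ∉ bad)) ∧
     ((r, c) ∉ done → get2 N 0 r c = -1 ∧ (r, c) ∉ bad))

theorem init_fold {R C : Int} {grid : List (List String)} {T : Nat → Nat → Bool}
    (hT : StableP R.toNat C.toNat grid T) :
    ∀ (todo done : List (Nat × Nat)) (N : List (List Int)) (bad : List (Nat × Nat)),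
      todo.Nodup → (∀ y ∈ todo, y.1 < R.toNat ∧ y.2 < C.toNat ∧ y ∉ done) →
      InvI R C grid T done N bad →
      InvI R C grid T (done ++ todo)
        (todo.foldl (initStep R C grid) (N, bad)).1
        (todo.foldl (initStep R C grid) (N, bad)).2 := by
  intro todo
  induction todo with
  | nil =>
      intro done N bad _ _ hI
      simpa using hI
  | cons x todo' ih =>
      intro done N bad hnd hb hI
      rw [List.nodup_cons] at hnd
      obtain ⟨hx1, hx2, hxd⟩ := hb x List.mem_cons_self
      obtain ⟨hsh, hbd, hbnd, hbT, hcell⟩ := hI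
      obtain ⟨x1, x2⟩ := x
      simp only at hx1 hx2 hxd
      have hold : get2 N 0 x1 x2 = -1 ∧ (x1, x2) ∉ bad :=
        (hcell x1 hx1 x2 hx2).2 hxd
      have hgoal : InvI R C grid T (done ++ [(x1, x2)])
          (initStep R C grid (N, bad) (x1, x2)).1 (initStep R C grid (N, bad) (x1, x2)).2 := by
        by_cases hcond : get2 grid "" x1 x2 = "#" ∨ degA R C x1 x2 < 2
        · have hres : initStep R C grid (N, bad) (x1, x2) = (set2 N x1 x2 0, (x1, x2) :: bad) := by
            simp only [initStep]
            rw [if_pos hcond]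
          rw [hres]
          have hTx : T x1 x2 = false := by
            by_contra hT'
            have hTt : T x1 x2 = true := by revert hT'; cases T x1 x2 <;> simp
            obtain ⟨_, _, hnh, hcnt⟩ := hT x1 x2 hTt
            have hlen : cnt T (nbr R.toNat C.toNat x1 x2) ≤ (nbr R.toNat C.toNat x1 x2).length :=
              cnt_le_length _ _
            have hdeg := degA_eq (R := R) (C := C) hx1 hx2
            rcases hcond with hcond | hcond
            · exact hnh hcond
            · omega
          refine ⟨shapeM_set2 hsh _ _ _, ?_, ?_, ?_, ?_⟩
          · intro y hy
            rcases List.mem_cons.mp hy with rfl | hy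
            · exact List.mem_append_right _ List.mem_cons_self
            · exact List.mem_append_left _ (hbd y hy)
          · exact List.nodup_cons.mpr ⟨fun h => hxd (hbd _ h), hbnd⟩
          · intro y hy
            rcases List.mem_cons.mp hy with rfl | hy
            · exact ⟨hx1, hx2, hTx⟩
            · exact hbT y hy
          · intro r hr c hc
            by_cases he : r = x1 ∧ c = x2
            · obtain ⟨rfl, rfl⟩ := he
              constructor
              · intro _
                left
                exact ⟨get2_set2_self hsh 0 hr hc 0, List.mem_cons_self⟩
              · intro hnotin
                exact absurd (List.mem_append_right _ (List.mem_singleton.mpr rfl)) hnotin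
            · have hne : (r, c) ≠ ((x1, x2) : Nat × Nat) := by
                simp only [Ne, Prod.mk.injEq]; exact he
              rw [get2_set2_ne 0 (fun h => hne h.symm) _]
              have hdone : ((r, c) ∈ done ++ [(x1, x2)]) ↔ ((r, c) ∈ done) := by
                simp only [List.mem_append, List.mem_singleton]
                exact ⟨fun h => h.resolve_right hne, Or.inl⟩
              have hbad : ((r, c) ∈ (x1, x2) :: bad) ↔ ((r, c) ∈ bad) := by
                simp only [List.mem_cons]
                exact ⟨fun h => h.resolve_left hne, Or.inr⟩
              constructor
              · intro hmem
                rcases (hcell r hr c hc).1 (hdone.mp hmem) with h | h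
                · exact Or.inl ⟨h.1, hbad.mpr h.2⟩
                · exact Or.inr ⟨h.1, h.2.1, h.2.2.1, fun hh => h.2.2.2 (hbad.mp hh)⟩
              · intro hmem
                have := (hcell r hr c hc).2 (fun h => hmem (hdone.mpr h))
                exact ⟨this.1, fun hh => this.2 (hbad.mp hh)⟩
        · have hres : initStep R C grid (N, bad) (x1, x2) =
              (set2 N x1 x2 (degA R C x1 x2), bad) := by
            simp only [initStep]
            rw [if_neg hcond]
          rw [hres]
          dsimp only
          rw [not_or, not_lt] at hcond
          refine ⟨shapeM_set2 hsh _ _ _, fun y hy => List.mem_append_left _ (hbd y hy), hbnd, hbT, ?_⟩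
          intro r hr c hc
          by_cases he : r = x1 ∧ c = x2
          · obtain ⟨rfl, rfl⟩ := he
            constructor
            · intro _
              right
              rw [get2_set2_self hsh 0 hr hc _]
              have hdeg := degA_eq (R := R) (C := C) hr hc
              exact ⟨hdeg, by omega, hcond.1, hold.2⟩
            · intro hnotin
              exact absurd (List.mem_append_right _ (List.mem_singleton.mpr rfl)) hnotin
          · have hne : (r, c) ≠ ((x1, x2) : Nat × Nat) := by
              simp only [Ne, Prod.mk.injEq]; exact he
            rw [get2_set2_ne 0 (fun h => hne h.symm) _]
            have hdone : ((r, c) ∈ done ++ [(x1, x2)]) ↔ ((r, c) ∈ done) := by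
              simp only [List.mem_append, List.mem_singleton]
              exact ⟨fun h => h.resolve_right hne, Or.inl⟩
            constructor
            · intro hmem
              exact (hcell r hr c hc).1 (hdone.mp hmem)
            · intro hmem
              exact (hcell r hr c hc).2 (fun h => hmem (hdone.mpr h))
      have hrw : done ++ (x1, x2) :: todo' = (done ++ [(x1, x2)]) ++ todo' := by simp
      rw [hrw, List.foldl_cons]
      have := ih (done ++ [(x1, x2)])
        (initStep R C grid (N, bad) (x1, x2)).1 (initStep R C grid (N, bad) (x1, x2)).2
        hnd.2 ?_ hgoal
      · exact this
      · intro y hy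
        obtain ⟨hy1, hy2, hy3⟩ := hb y (List.mem_cons_of_mem _ hy)
        refine ⟨hy1, hy2, ?_⟩
        intro hmem
        rcases List.mem_append.mp hmem with h | h
        · exact hy3 h
        · rcases List.mem_singleton.mp h with rfl
          exact hnd.1 hy

theorem initA_inv {R C : Int} {grid : List (List String)} {T : Nat → Nat → Bool}
    (hT : StableP R.toNat C.toNat grid T) :
    InvM R.toNat C.toNat grid T (initA R C grid).1 (initA R C grid).2 [] [] := by
  have hbase : InvI R C grid T [] ((List.range R.toNat).map (fun _ => List.replicate C.toNat (-1 : Int))) [] := by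
    have hrw : ((List.range R.toNat).map (fun _ => List.replicate C.toNat (-1 : Int)))
        = ((List.range R.toNat).map (fun r => (List.range C.toNat).map ((fun _ _ => (-1 : Int)) r))) := by
      apply List.map_congr_left
      intro a _
      rw [List.map_const']
      simp
    rw [hrw]
    refine ⟨shapeM_map_range _ _ _, by simp, List.nodup_nil, by simp, ?_⟩
    intro r hr c hc
    refine ⟨by simp, fun _ => ⟨?_, by simp⟩⟩
    rw [get2_map_range _ _ _ _ hr hc]
  have hfold := init_fold hT (cellsRC R.toNat C.toNat) [] _ [] (nodup_cellsRC _ _)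
    (fun y hy => ⟨(mem_cellsRC.mp hy).1, (mem_cellsRC.mp hy).2, List.not_mem_nil⟩) hbase
  rw [List.nil_append] at hfold
  obtain ⟨hsh, hbd, hbnd, hbT, hcell⟩ := hfold
  unfold initA
  refine ⟨hsh, ?_, hbnd, ?_, ?_⟩
  · intro x hx
    rw [List.nil_append] at hx
    exact hbT x hx
  · intro r hr c hc
    rw [List.nil_append]
    have hmem : ((r, c) : Nat × Nat) ∈ cellsRC R.toNat C.toNat := mem_cellsRC.mpr ⟨hr, hc⟩
    constructor
    · intro h0
      rcases (hcell r hr c hc).1 hmem with h | h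
      · exact h.2
      · obtain ⟨h1, h2, _, _⟩ := h
        omega
    · intro hb
      rcases (hcell r hr c hc).1 hmem with h | h
      · exact h.1
      · exact absurd hb h.2.2.2
  · intro r hr c hc hne0
    have hmem : ((r, c) : Nat × Nat) ∈ cellsRC R.toNat C.toNat := mem_cellsRC.mpr ⟨hr, hc⟩
    rcases (hcell r hr c hc).1 hmem with h | h
    · exact absurd h.1 hne0
    · refine ⟨h.2.2.1, h.2.1, ?_⟩
      rw [cnt_nil, if_neg (List.not_mem_nil)]
      rw [h.1]
      push_cast
      ring

-- final state of A's elimination, under any stable T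
theorem A_final {R C : Int} {grid : List (List String)} {T : Nat → Nat → Bool}
    (hT : StableP R.toNat C.toNat grid T) :
    ∃ P', InvM R.toNat C.toNat grid T
      (loopA R C ((initA R C grid).2.length + 2 * sumNei (initA R C grid).1 + 1)
        (initA R C grid).1 (initA R C grid).2) [] P' [] := by
  obtain ⟨P', hP'⟩ := loopA_run hT ((initA R C grid).2.length + 2 * sumNei (initA R C grid).1 + 1)
    (initA R C grid).1 (initA R C grid).2 [] (initA_inv hT) (by omega)
  exact ⟨P', hP'⟩

-- ---- B side ----
theorem cntB_eq {R C : Int} {S : List (List Bool)} {r c : Nat}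
    (hr : r < R.toNat) (hc : c < C.toNat) :
    cntB R C S r c = cnt (fun a b => get2 S false a b) (nbr R.toNat C.toNat r c) := by
  have e2 : ((r : Int) + 1 < R) ↔ (r + 1 < R.toNat) := by omega
  have e4 : ((c : Int) + 1 < C) ↔ (c + 1 < C.toNat) := by omega
  simp only [cntB, cnt, nbr, e2, e4, List.countP_append]
  by_cases h1 : 0 < r <;> by_cases h2 : r + 1 < R.toNat <;> by_cases h3 : 0 < c <;>
    by_cases h4 : c + 1 < C.toNat <;>
    simp [h1, h2, h3, h4, List.countP_cons]

theorem rowLe : ∀ (a b : List Bool), a.length = b.length →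
    (∀ c, a.getD c false = true → b.getD c false = true) →
    a.countP (fun x => x) ≤ b.countP (fun x => x) ∧
    (a ≠ b → a.countP (fun x => x) < b.countP (fun x => x)) := by
  intro a
  induction a with
  | nil =>
      intro b hlen _
      have : b = [] := List.length_eq_zero_iff.mp (by simpa using hlen.symm)
      subst this
      exact ⟨le_refl _, fun h => absurd rfl h⟩
  | cons x a' ih =>
      intro b hlen hpt
      cases b with
      | nil => simp at hlen
      | cons y b' =>
          have hhead : x = true → y = true := by
            have := hpt 0
            simpa using this
          have htail : ∀ c, a'.getD c false = true → b'.getD c false = true := by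
            intro c
            have := hpt (c + 1)
            simpa using this
          obtain ⟨hle, hlt⟩ := ih b' (by simpa using hlen) htail
          simp only [List.countP_cons]
          cases hx : x <;> cases hy : y
          · refine ⟨by simpa using hle, fun hne => ?_⟩
            have hne' : a' ≠ b' := by
              intro h; exact hne (by rw [h])
            have := hlt hne'
            simpa using this
          · refine ⟨by simp; omega, fun _ => by simp; omega⟩
          · exact absurd (hhead hx) (by simp [hy])
          · refine ⟨by simpa using hle, fun hne => ?_⟩
            have hne' : a' ≠ b' := by
              intro h; exact hne (by rw [h])
            have := hlt hne'
            simpa using this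

theorem matLe : ∀ (Sa Sb : List (List Bool)), Sa.length = Sb.length →
    (∀ r, (Sa.getD r []).length = (Sb.getD r []).length) →
    (∀ r c, get2 Sa false r c = true → get2 Sb false r c = true) →
    cntTrue Sa ≤ cntTrue Sb ∧ (Sa ≠ Sb → cntTrue Sa < cntTrue Sb) := by
  intro Sa
  induction Sa with
  | nil =>
      intro Sb hlen _ _
      have : Sb = [] := List.length_eq_zero_iff.mp (by simpa using hlen.symm)
      subst this
      exact ⟨le_refl _, fun h => absurd rfl h⟩
  | cons ra Sa' ih =>
      intro Sb hlen hrows hpt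
      cases Sb with
      | nil => simp at hlen
      | cons rb Sb' =>
          have hrowlen : ra.length = rb.length := by
            have := hrows 0
            simpa using this
          have hrowpt : ∀ c, ra.getD c false = true → rb.getD c false = true := by
            intro c
            have := hpt 0 c
            simpa [get2] using this
          obtain ⟨hrle, hrlt⟩ := rowLe ra rb hrowlen hrowpt
          have htailpt : ∀ r c, get2 Sa' false r c = true → get2 Sb' false r c = true := by
            intro r c
            have := hpt (r + 1) c
            simpa [get2] using this
          obtain ⟨hle, hlt⟩ := ih Sb' (by simpa using hlen)
            (fun r => by have := hrows (r + 1); simpa using this) htailpt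
          have hta := cntTrue_eq Sa'
          have htb := cntTrue_eq Sb'
          refine ⟨?_, ?_⟩
          · simp only [cntTrue_eq, List.map_cons, List.sum_cons]
            omega
          · intro hne
            by_cases hhead : ra = rb
            · have hne' : Sa' ≠ Sb' := by
                intro hh
                exact hne (by rw [hh, hhead])
              have h5 := hlt hne'
              subst hhead
              simp only [cntTrue_eq, List.map_cons, List.sum_cons]
              omega
            · have h5 := hrlt hhead
              simp only [cntTrue_eq, List.map_cons, List.sum_cons]
              omega

theorem passB_le {R C : Int} {S : List (List Bool)} (r c : Nat) :
    get2 (passB R C S) false r c = true → get2 S false r c = true := by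
  intro h
  by_cases hin : r < R.toNat ∧ c < C.toNat
  · rw [passB, get2_map_range _ _ _ _ hin.1 hin.2] at h
    exact (Bool.and_eq_true .. ▸ h : _ ∧ _).1
  · rw [passB] at h
    rw [get2_oob (n := R.toNat) (m := C.toNat) (shapeM_map_range _ _ _) false (by omega)] at h
    exact absurd h (by simp)

theorem loopB_run {R C : Int} (grid : List (List String)) :
    ∀ (f : Nat) (S : List (List Bool)), shapeM R.toNat C.toNat S → cntTrue S < f →
      shapeM R.toNat C.toNat (loopB R C f S) ∧
      passB R C (loopB R C f S) = loopB R C f S ∧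
      (∀ r c, get2 (loopB R C f S) false r c = true → get2 S false r c = true) ∧
      (∀ p, StableP R.toNat C.toNat grid p →
        (∀ r c, p r c = true → get2 S false r c = true) →
        ∀ r c, p r c = true → get2 (loopB R C f S) false r c = true) := by
  intro f
  induction f with
  | zero =>
      intro S _ hcnt
      omega
  | succ f ih =>
      intro S hsh hcnt
      by_cases heq : passB R C S = S
      · have hres : loopB R C (f + 1) S = S := by
          simp [loopB, heq]
        rw [hres]
        exact ⟨hsh, heq, fun _ _ h => h, fun p _ hsub => hsub⟩
      · have hres : loopB R C (f + 1) S = loopB R C f (passB R C S) := by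
          simp [loopB, heq]
        rw [hres]
        have hshp : shapeM R.toNat C.toNat (passB R C S) := shapeM_map_range _ _ _
        have hlens : ∀ r, ((passB R C S).getD r []).length = (S.getD r []).length := by
          intro r
          by_cases hr : r < R.toNat
          · rw [hshp.2 r hr, hsh.2 r hr]
          · have h1 : (passB R C S)[r]? = none := by
              rw [List.getElem?_eq_none_iff, hshp.1]; omega
            have h2 : S[r]? = none := by
              rw [List.getElem?_eq_none_iff, hsh.1]; omega
            simp [List.getD_eq_getElem?_getD, h1, h2]
        have hstrict : cntTrue (passB R C S) < cntTrue S :=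
          (matLe (passB R C S) S (by rw [hshp.1, hsh.1]) hlens passB_le).2 heq
        obtain ⟨ih1, ih2, ih3, ih4⟩ := ih (passB R C S) hshp (by omega)
        refine ⟨ih1, ih2, fun r c h => passB_le r c (ih3 r c h), ?_⟩
        intro p hst hsub
        apply ih4 p hst
        intro r c hp
        obtain ⟨hr, hc, _, hcnt2⟩ := hst r c hp
        rw [passB, get2_map_range _ _ _ _ hr hc]
        have hS : get2 S false r c = true := hsub r c hp
        have hmono : cnt p (nbr R.toNat C.toNat r c) ≤
            cnt (fun a b => get2 S false a b) (nbr R.toNat C.toNat r c) :=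
          cnt_mono (fun y _ hy => hsub y.1 y.2 hy)
        rw [hS, cntB_eq hr hc]
        simp only [Bool.true_and, decide_eq_true_eq]
        omega

-- ---- glue ----
theorem finAB {n m : Nat} {N : List (List Int)} {S : List (List Bool)}
    (h : ∀ r c, r < n → c < m →
      (get2 N 0 r c = 0 ↔ get2 S false r c = false) ∧
      (2 ≤ get2 N 0 r c ↔ get2 S false r c = true)) :
    ∀ (l : List (Nat × Nat)), (∀ y ∈ l, y.1 < n ∧ y.2 < m) →
      ∀ g, finA N l g = finB S l g := by
  intro l
  induction l with
  | nil =>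
      intro _ g
      rfl
  | cons x rest ih =>
      intro hl g
      obtain ⟨r, c⟩ := x
      have hb := hl (r, c) List.mem_cons_self
      simp only at hb
      have h1 := (h r c hb.1 hb.2).1
      have h2 := (h r c hb.1 hb.2).2
      show (if get2 g "" r c = "^" ∧ get2 N 0 r c = 0 then ("Impossible", none)
            else finA N rest (if 2 ≤ get2 N 0 r c then set2 g r c "^" else g)) =
          (if get2 g "" r c = "^" ∧ get2 S false r c = false then ("Impossible", none)
            else finB S rest (if get2 S false r c then set2 g r c "^" else g))
      by_cases hA : get2 g "" r c = "^" ∧ get2 N 0 r c = 0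
      · rw [if_pos hA, if_pos ⟨hA.1, h1.mp hA.2⟩]
      · rw [if_neg hA, if_neg (show ¬(get2 g "" r c = "^" ∧ get2 S false r c = false) from
          fun hB => hA ⟨hB.1, h1.mpr hB.2⟩)]
        have hinner : (if 2 ≤ get2 N 0 r c then set2 g r c "^" else g) =
            (if get2 S false r c = true then set2 g r c "^" else g) := by
          by_cases h3 : 2 ≤ get2 N 0 r c
          · rw [if_pos h3, if_pos (h2.mp h3)]
          · rw [if_neg h3, if_neg (fun hbb => h3 (h2.mpr hbb))]
        rw [hinner]
        exact ih (fun y hy => hl y (List.mem_cons_of_mem _ hy)) _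

-- ===== VERDICT (by name: the statement is the Claim_ definition above) =====
theorem solve_spec : Claim_equal_solve := by
  intro R C grid _hdom _hpre
  unfold Spec_solve
  have hA : solve R C grid =
      finA (loopA R C ((initA R C grid).2.length + 2 * sumNei (initA R C grid).1 + 1)
        (initA R C grid).1 (initA R C grid).2) (cellsRC R.toNat C.toNat) grid := rfl
  have hB : solve_alt R C grid =
      finB (loopB R C
          (cntTrue ((List.range R.toNat).map fun r => (List.range C.toNat).map fun c =>
            decide (get2 grid "" r c ≠ "#")) + 1)
          ((List.range R.toNat).map fun r => (List.range C.toNat).map fun c =>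
            decide (get2 grid "" r c ≠ "#")))
        (cellsRC R.toNat C.toNat) grid := rfl
  rw [hA, hB]
  obtain ⟨hshS, hfix, hle0, hmax⟩ := loopB_run (R := R) (C := C) grid
    (cntTrue ((List.range R.toNat).map fun r => (List.range C.toNat).map fun c =>
      decide (get2 grid "" r c ≠ "#")) + 1)
    ((List.range R.toNat).map fun r => (List.range C.toNat).map fun c =>
      decide (get2 grid "" r c ≠ "#"))
    (shapeM_map_range _ _ _) (by omega)
  set A0 := ((List.range R.toNat).map fun r => (List.range C.toNat).map fun c =>
    decide (get2 grid "" r c ≠ "#")) with hA0def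
  set Sf := loopB R C (cntTrue A0 + 1) A0 with hSfdef
  -- B's final mask is stable
  have hstB : StableP R.toNat C.toNat grid (fun r c => get2 Sf false r c) := by
    unfold StableP
    intro r c hp
    simp only at hp
    have hin : r < R.toNat ∧ c < C.toNat := by
      by_cases hr : r < R.toNat
      · by_cases hc : c < C.toNat
        · exact ⟨hr, hc⟩
        · rw [get2_oob hshS false (Or.inr (by omega))] at hp
          exact absurd hp (by simp)
      · rw [get2_oob hshS false (Or.inl (by omega))] at hp
        exact absurd hp (by simp)
    have halive0 : get2 A0 false r c = true := hle0 r c hp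
    rw [hA0def, get2_map_range _ _ _ _ hin.1 hin.2] at halive0
    have hnh : get2 grid "" r c ≠ "#" := by simpa using halive0
    have hfixrc : get2 Sf false r c = get2 (passB R C Sf) false r c := by rw [hfix]
    rw [hfixrc, passB, get2_map_range _ _ _ _ hin.1 hin.2, Bool.and_eq_true,
      decide_eq_true_eq, cntB_eq hin.1 hin.2] at hp
    exact ⟨hin.1, hin.2, hnh, hp.2⟩
  obtain ⟨P', hInvB⟩ := A_final (R := R) (C := C) hstB
  obtain ⟨P0, hInv0⟩ := A_final (R := R) (C := C) (T := fun _ _ => false)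
    (by unfold StableP; intro r c h; simp at h)
  set Nf := loopA R C ((initA R C grid).2.length + 2 * sumNei (initA R C grid).1 + 1)
    (initA R C grid).1 (initA R C grid).2 with hNfdef
  obtain ⟨hshN, _hPB0, _hnd0, hzero0, halive0A⟩ := hInv0
  obtain ⟨_, hPBB, _, hzeroB, _⟩ := hInvB
  simp only [List.append_nil] at hzero0 hzeroB hPBB
  -- A's final counters are stable
  have hstA : StableP R.toNat C.toNat grid (fun r c => decide (get2 Nf 0 r c ≠ 0)) := by
    unfold StableP
    intro r c hp
    rw [decide_eq_true_eq] at hp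
    have hin : r < R.toNat ∧ c < C.toNat := by
      by_cases hr : r < R.toNat
      · by_cases hc : c < C.toNat
        · exact ⟨hr, hc⟩
        · rw [get2_oob hshN 0 (Or.inr (by omega))] at hp
          exact absurd rfl hp
      · rw [get2_oob hshN 0 (Or.inl (by omega))] at hp
        exact absurd rfl hp
    obtain ⟨g1, g2, g3⟩ := halive0A r hin.1 c hin.2 hp
    rw [if_neg List.not_mem_nil, add_zero] at g3
    have hcong : cnt (fun a b => decide (get2 Nf 0 a b ≠ 0)) (nbr R.toNat C.toNat r c)
        = cnt (fun a b => !memb P0 a b) (nbr R.toNat C.toNat r c) := by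
      apply cnt_congr
      intro y hy
      obtain ⟨hy1, hy2⟩ := nbr_bounds hin.1 hin.2 hy
      have hz := hzero0 y.1 hy1 y.2 hy2
      by_cases hmem : ((y.1, y.2) : Nat × Nat) ∈ P0
      · simp [memb, hmem, hz.mpr hmem]
      · have hne : get2 Nf 0 y.1 y.2 ≠ 0 := fun h => hmem (hz.mp h)
        simp [memb, hmem, hne]
    have hcompl := cnt_compl (memb P0) (nbr R.toNat C.toNat r c)
    refine ⟨hin.1, hin.2, g1, ?_⟩
    rw [hcong]
    omega
  -- the two alive predicates agree on the grid
  have hpt : ∀ r c, r < R.toNat → c < C.toNat →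
      (get2 Nf 0 r c = 0 ↔ get2 Sf false r c = false) ∧
      (2 ≤ get2 Nf 0 r c ↔ get2 Sf false r c = true) := by
    intro r c hr hc
    have hz := hzeroB r hr c hc
    have hAtoB : get2 Nf 0 r c ≠ 0 → get2 Sf false r c = true := by
      intro hne
      have := hmax (fun a b => decide (get2 Nf 0 a b ≠ 0)) hstA ?_ r c (by simpa using hne)
      · exact this
      · intro a b hp
        obtain ⟨ha, hb2, hnh, _⟩ := hstA a b hp
        rw [hA0def, get2_map_range _ _ _ _ ha hb2]
        simpa using hnh
    have hBtoA : get2 Sf false r c = true → get2 Nf 0 r c ≠ 0 := by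
      intro hb hz0
      have hTfalse := (hPBB (r, c) (hz.mp hz0)).2.2
      simp only at hTfalse
      rw [hb] at hTfalse
      exact absurd hTfalse (by simp)
    refine ⟨⟨?_, ?_⟩, ⟨?_, ?_⟩⟩
    · intro h0
      cases hSf : get2 Sf false r c
      · rfl
      · exact absurd h0 (hBtoA hSf)
    · intro hf
      by_contra hne0
      rw [hAtoB hne0] at hf
      exact absurd hf (by simp)
    · intro h2
      exact hAtoB (by omega)
    · intro hb
      exact (halive0A r hr c hc (hBtoA hb)).2.1
  exact finAB hpt (cellsRC R.toNat C.toNat) (fun y hy => mem_cellsRC.mp hy) grid
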